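-- pv_equiv track=rewrite | github.com/sqdwrd/BaekJoon | 10773.py | process_next
-- ===== SOURCE A (Python) =====
-- def process_next(cmd_queue: list[int], numbers: list[int] = []):
--     if len(cmd_queue) == 0:
--         return numbers
--
--     cmd = cmd_queue.pop(0)
--     if (cmd == 0):
--         numbers.pop()
--     else:
--         numbers.append(cmd)
--
--     return process_next(cmd_queue, numbers)
-- ===== SOURCE B (Python) =====
-- def process_next(cmd_queue: list[int], numbers: list[int] = []):
--     # Backward "skip counter" pass: a 0 cancels the nearest surviving earlier push;
--     # leftover cancellations fall onto the tail of the initial stack.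
--     kept = []
--     skip = 0
--     for cmd in reversed(cmd_queue):
--         if cmd == 0:
--             skip += 1
--         elif skip:
--             skip -= 1
--         else:
--             kept.append(cmd)
--     kept.reverse()
--     return numbers[:max(len(numbers) - skip, 0)] + kept
-- ===== Notes on version B (the rewrite author's own statement) =====
-- stated objective: alternative
-- what changed: Replaced A's front-to-back tail-recursive simulation of the stack by a single backward pass with a skip counter (each 0 cancels the nearest surviving earlier push; leftover cancellations truncate the initial stack), assembling the result by slicing plus concatenation.
import Mathlib
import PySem

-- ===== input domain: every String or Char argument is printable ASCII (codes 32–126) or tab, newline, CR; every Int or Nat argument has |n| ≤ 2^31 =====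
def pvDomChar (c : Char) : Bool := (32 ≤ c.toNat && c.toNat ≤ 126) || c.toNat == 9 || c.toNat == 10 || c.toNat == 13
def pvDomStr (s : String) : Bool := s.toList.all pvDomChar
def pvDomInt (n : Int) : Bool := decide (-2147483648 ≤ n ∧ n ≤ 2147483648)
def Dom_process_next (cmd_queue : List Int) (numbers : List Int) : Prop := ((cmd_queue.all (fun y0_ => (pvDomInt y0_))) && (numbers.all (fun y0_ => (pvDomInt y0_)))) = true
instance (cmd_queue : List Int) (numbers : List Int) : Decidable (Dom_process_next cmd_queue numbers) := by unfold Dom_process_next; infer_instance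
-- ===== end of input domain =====

-- B replaces A's front-to-back stack simulation by one backward pass with a skip counter.
-- Equivalence is about the RETURN value only: Python A also mutates its arguments (empties
-- cmd_queue, pushes/pops on the possibly shared-default numbers list); B does not mutate.

-- ===== PORT A =====
-- literal transliteration of A's tail recursion: pop(0) becomes head/tail, numbers.pop() becomes dropLast
def process_next (cmd_queue : List Int) (numbers : List Int) : List Int :=
  match cmd_queue with
  | [] => numbers
  | cmd :: rest =>
      if cmd = 0 then process_next rest numbers.dropLast
      else process_next rest (numbers ++ [cmd])

-- ===== PORT B =====
-- B's backward loop: state is (kept-so-far appended in reverse order, skip counter)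
def pvBackStep (p : List Int × Nat) (cmd : Int) : List Int × Nat :=
  if cmd = 0 then (p.1, p.2 + 1)
  else if p.2 ≠ 0 then (p.1, p.2 - 1)
  else (p.1 ++ [cmd], p.2)

-- numbers[:max(len(numbers)-skip,0)] is List.take with Nat (saturating) subtraction, which is exact here
def process_next_alt (cmd_queue : List Int) (numbers : List Int) : List Int :=
  let r := cmd_queue.reverse.foldl pvBackStep ([], 0)
  numbers.take (numbers.length - r.2) ++ r.1.reverse

-- ===== PRECONDITION & SPEC =====
-- Pre_ excludes exactly the inputs on which Python A raises IndexError: some 0-command is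
-- executed while the stack is empty (stack height before each pop must be positive).
def Pre_process_next (cmd_queue : List Int) (numbers : List Int) : Prop :=
  ∀ i, i < cmd_queue.length → cmd_queue.getD i 1 = 0 →
    0 < (numbers.length : Int) +
      ((cmd_queue.take i).foldl (fun h c => h + if c = 0 then (-1 : Int) else 1) 0)
instance (cmd_queue : List Int) (numbers : List Int) : Decidable (Pre_process_next cmd_queue numbers) := by unfold Pre_process_next; infer_instance

def pvWitness_process_next : List Int × List Int := ([3, 5, 0, 2], [7])

def Spec_process_next (cmd_queue : List Int) (numbers : List Int) (out : List Int) : Prop := out = process_next_alt cmd_queue numbers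
instance (cmd_queue : List Int) (numbers : List Int) (out : List Int) : Decidable (Spec_process_next cmd_queue numbers out) := by unfold Spec_process_next; infer_instance

-- ===== CLAIM (what is proved, stated in full; the proofs are below) =====
def Claim_equal_process_next : Prop := ∀ (cmd_queue : List Int) (numbers : List Int), Dom_process_next cmd_queue numbers → Pre_process_next cmd_queue numbers → Spec_process_next cmd_queue numbers (process_next cmd_queue numbers)

-- ===== LEMMAS AND PROOFS =====

-- peel the *first* command off B's backward fold: reversed (c :: rest) processes rest first, then c
theorem backFold_cons (c : Int) (rest : List Int) :
    (c :: rest).reverse.foldl pvBackStep ([], 0)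
      = pvBackStep (rest.reverse.foldl pvBackStep ([], 0)) c := by
  simp [List.reverse_cons, List.foldl_append]

-- the Lean models agree on every input (dropLast/take saturate where Python raises)
theorem process_next_eq_alt (cmd_queue : List Int) :
    ∀ numbers, process_next cmd_queue numbers = process_next_alt cmd_queue numbers := by
  induction cmd_queue with
  | nil => intro n; simp [process_next, process_next_alt]
  | cons c rest ih =>
      intro n
      simp only [process_next]
      split_ifs with h
      · -- c = 0 : A pops; B counts one more pending cancellation
        rw [ih]
        simp only [process_next_alt, backFold_cons, pvBackStep, h, if_pos,
          List.dropLast_eq_take, List.take_take, List.length_take]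
        congr 2
        omega
      · -- c ≠ 0 : A pushes; B either cancels it against a pending 0 or keeps it
        rw [ih]
        simp only [process_next_alt, backFold_cons, pvBackStep, if_neg h]
        set r := rest.reverse.foldl pvBackStep ([], 0) with hr
        by_cases hs : r.2 = 0
        · simp only [hs, ne_eq, not_true_eq_false, if_false]
          simp [List.take_append]
        · simp only [ne_eq, hs, not_false_eq_true, if_true]
          have hlen : n.length + 1 - r.2 ≤ n.length := by omega
          rw [List.take_append_of_le_length (by simpa using hlen)]
          congr 2
          simp
          omega
-- ===== VERDICT (by name: the statement is the Claim_ definition above) =====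
theorem process_next_spec : Claim_equal_process_next := by
  intro q n _ _
  exact process_next_eq_alt q n
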